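-- pv_equiv track=rewrite | github.com/notsoseamless/python_training | algorithmic_thinking/Coding_activities/alg_further_leaplist_solution.py | is_goal_reachable_helper
-- ===== SOURCE A (Python) =====
-- def is_goal_reachable_helper(leap_list, start_index, considered_indices):
--     """
--     Determines whether goal can be reached in any number of leaps.
--
--     Arguments:
--     leap_list - the leap list game board.
--     start_index - the starting index of the player.
--     considered_indices - a set of positions that should not be explored.
--
--     Returns:
--     True if goal is reachable.  False if goal is not reachable.
--     """
--     if start_index < 0:  # leapt off the list left
--         return False
--     elif start_index >= len(leap_list):  # leapt off the list right
--         return False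
--     elif leap_list[start_index] == 0:
--         return True
--     elif start_index in considered_indices:
--         return False
--     else:
--         leap_left_index  = start_index - leap_list[start_index]
--         leap_right_index = start_index + leap_list[start_index]
--         considered_indices.add(start_index)
--         return (is_goal_reachable_helper(leap_list, leap_left_index,  considered_indices)
--                 or is_goal_reachable_helper(leap_list, leap_right_index, considered_indices))
-- ===== SOURCE B (Python) =====
-- def is_goal_reachable_helper(leap_list, start_index, considered_indices):
--     """Iterative DFS with an explicit stack (same traversal as the recursion)."""
--     stack = [start_index]
--     while stack:
--         index = stack.pop()
--         if index < 0 or index >= len(leap_list):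
--             continue
--         step = leap_list[index]
--         if step == 0:
--             return True
--         if index in considered_indices:
--             continue
--         considered_indices.add(index)
--         stack.append(index + step)
--         stack.append(index - step)
--     return False
-- ===== Notes on version B (the rewrite author's own statement) =====
-- stated objective: alternative
-- what changed: Replaces A's nested recursion (with the visited set threaded through the short-circuiting or) by an iterative pre-order DFS with an explicit stack (push right child then left, mark at pop).
import Mathlib
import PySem

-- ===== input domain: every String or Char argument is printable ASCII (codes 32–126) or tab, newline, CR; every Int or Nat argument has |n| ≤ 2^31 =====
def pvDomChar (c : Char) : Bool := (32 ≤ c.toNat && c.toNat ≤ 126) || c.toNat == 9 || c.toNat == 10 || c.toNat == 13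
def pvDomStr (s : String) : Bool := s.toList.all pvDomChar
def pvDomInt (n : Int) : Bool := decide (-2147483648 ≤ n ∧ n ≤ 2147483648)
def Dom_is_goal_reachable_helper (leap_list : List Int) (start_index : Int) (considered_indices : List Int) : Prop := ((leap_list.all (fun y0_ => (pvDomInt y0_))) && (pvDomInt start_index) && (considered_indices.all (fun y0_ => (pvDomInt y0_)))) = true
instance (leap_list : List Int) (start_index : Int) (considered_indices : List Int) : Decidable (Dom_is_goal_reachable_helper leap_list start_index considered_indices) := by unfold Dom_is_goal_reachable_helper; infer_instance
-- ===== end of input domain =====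

-- B replaces A's nested recursion (which threads the mutated visited set through the
-- short-circuiting `or`) by an iterative DFS with an explicit stack; same return value,
-- and both A and B mutate considered_indices identically (the proved equivalence is
-- about the return value).

-- ===== PORT A =====
-- A's recursion terminates because each recursing call adds a new in-range index to the
-- visited set; the fuel `leap_list.length + 1` bounds the recursion depth and is never
-- exhausted: the recursion depth is at most unvisited + 1 (see pvUnvisited_add / sim below).
-- The set mutation is threaded explicitly: goA returns (result, final set).
def goA (L : List Int) : Nat → Int → PySem.Set Int → Bool × PySem.Set Int
  | 0, _, c => (false, c)
  | fuel + 1, i, c =>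
    if i < 0 then (false, c)                                 -- leapt off the list left
    else if (L.length : Int) ≤ i then (false, c)             -- leapt off the list right
    else if PySem.List.pyGetD L i 0 = 0 then (true, c)       -- leap_list[start_index] == 0
    else if PySem.Set.contains c i then (false, c)           -- start_index in considered_indices
    else                                                     -- considered_indices.add; left or right
      match goA L fuel (i - PySem.List.pyGetD L i 0) (PySem.Set.add c i) with
      | (true, c1) => (true, c1)
      | (false, c1) => goA L fuel (i + PySem.List.pyGetD L i 0) c1

def is_goal_reachable_helper (leap_list : List Int) (start_index : Int) (considered_indices : List Int) : Bool :=
  (goA leap_list (leap_list.length + 1) start_index (PySem.Set.ofList considered_indices)).1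

-- ===== PORT B =====
-- Stack with its top at the head (Python's list.pop/append work at the end, so
-- append(i+step); append(i-step); pop  ↦  (i-step) :: (i+step) :: stack).  The fuel
-- `2*length+1` bounds the number of loop iterations (each pops one entry; pushes happen
-- at most once per newly visited in-range index) and is never exhausted (loopB_stable).
def loopB (L : List Int) : Nat → List Int → PySem.Set Int → Bool
  | 0, _, _ => false
  | _ + 1, [], _ => false
  | fuel + 1, i :: stack, c =>
    if i < 0 ∨ (L.length : Int) ≤ i then loopB L fuel stack c
    else if PySem.List.pyGetD L i 0 = 0 then true
    else if PySem.Set.contains c i then loopB L fuel stack c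
    else loopB L fuel ((i - PySem.List.pyGetD L i 0) :: (i + PySem.List.pyGetD L i 0) :: stack) (PySem.Set.add c i)

def is_goal_reachable_helper_alt (leap_list : List Int) (start_index : Int) (considered_indices : List Int) : Bool :=
  loopB leap_list (2 * leap_list.length + 1) [start_index] (PySem.Set.ofList considered_indices)

-- ===== PRECONDITION & SPEC =====
def Spec_is_goal_reachable_helper (leap_list : List Int) (start_index : Int) (considered_indices : List Int) (out : Bool) : Prop := out = is_goal_reachable_helper_alt leap_list start_index considered_indices
instance (leap_list : List Int) (start_index : Int) (considered_indices : List Int) (out : Bool) : Decidable (Spec_is_goal_reachable_helper leap_list start_index considered_indices out) := by unfold Spec_is_goal_reachable_helper; infer_instance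

-- ===== CLAIM (what is proved, stated in full; the proofs are below) =====
def Claim_equal_is_goal_reachable_helper : Prop := ∀ (leap_list : List Int) (start_index : Int) (considered_indices : List Int), Dom_is_goal_reachable_helper leap_list start_index considered_indices → Spec_is_goal_reachable_helper leap_list start_index considered_indices (is_goal_reachable_helper leap_list start_index considered_indices)

-- ===== LEMMAS AND PROOFS =====

-- number of in-range indices not yet in the visited set
def pvUnvisited (L : List Int) (c : PySem.Set Int) : Nat :=
  ((Finset.range L.length).filter (fun j : ℕ => ((j : Int) ∉ c))).card

theorem pvUnvisited_le (L : List Int) (c : PySem.Set Int) : pvUnvisited L c ≤ L.length := by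
  simpa [pvUnvisited] using Finset.card_filter_le (Finset.range L.length) _

theorem pvUnvisited_add (L : List Int) (c : PySem.Set Int) (i : Int)
    (h0 : ¬ i < 0) (h1 : ¬ (L.length : Int) ≤ i) (hc : i ∉ c) :
    pvUnvisited L (PySem.Set.add c i) + 1 = pvUnvisited L c := by
  unfold pvUnvisited
  have hmemf : i.toNat ∈ (Finset.range L.length).filter (fun j : ℕ => ((j : Int) ∉ c)) := by
    simp only [Finset.mem_filter, Finset.mem_range]
    exact ⟨by omega, by simpa [Int.toNat_of_nonneg (by omega : (0:Int) ≤ i)] using hc⟩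
  have hfe : (Finset.range L.length).filter (fun j : ℕ => ((j : Int) ∉ PySem.Set.add c i))
      = ((Finset.range L.length).filter (fun j : ℕ => ((j : Int) ∉ c))).erase i.toNat := by
    ext j
    simp only [Finset.mem_filter, Finset.mem_erase, Finset.mem_range, PySem.Set.mem_add]
    constructor
    · rintro ⟨hj, hni⟩
      exact ⟨by intro h; exact hni (Or.inr (by omega)), hj, fun h => hni (Or.inl h)⟩
    · rintro ⟨hne, hj, hni⟩
      refine ⟨hj, ?_⟩
      rintro (h | h)
      · exact hni h
      · exact hne (by omega)
  rw [hfe, Finset.card_erase_of_mem hmemf]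
  have hpos : 0 < ((Finset.range L.length).filter (fun j : ℕ => ((j : Int) ∉ c))).card :=
    Finset.card_pos.mpr ⟨i.toNat, hmemf⟩
  omega

theorem subset_goA (L : List Int) (fuel : Nat) (i : Int) (c : PySem.Set Int) :
    ∀ x, x ∈ c → x ∈ (goA L fuel i c).2 := by
  induction fuel generalizing i c with
  | zero => intro x hx; simpa [goA] using hx
  | succ n ih =>
    intro x hx
    unfold goA
    split_ifs with h0 h1 hz hc
    · exact hx
    · exact hx
    · exact hx
    · exact hx
    · have hx' : x ∈ PySem.Set.add c i := (PySem.Set.mem_add _ _ _).mpr (Or.inl hx)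
      cases hgl : goA L n (i - PySem.List.pyGetD L i 0) (PySem.Set.add c i) with
      | mk bl c1 =>
        have hc1 : x ∈ c1 := by
          have := ih (i - PySem.List.pyGetD L i 0) (PySem.Set.add c i) x hx'
          rwa [hgl] at this
        cases bl
        · simpa using ih (i + PySem.List.pyGetD L i 0) c1 x hc1
        · simpa using hc1

theorem pvUnvisited_mono (L : List Int) (c d : PySem.Set Int)
    (h : ∀ x, x ∈ c → x ∈ d) :
    pvUnvisited L d ≤ pvUnvisited L c := by
  unfold pvUnvisited
  apply Finset.card_le_card
  intro j hj
  simp only [Finset.mem_filter] at *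
  exact ⟨hj.1, fun hd => hj.2 (h _ hd)⟩

theorem loopB_stable (L : List Int) (fuel fuel' : Nat) (s : List Int) (c : PySem.Set Int)
    (h : s.length + 2 * pvUnvisited L c ≤ fuel) (h' : s.length + 2 * pvUnvisited L c ≤ fuel') :
    loopB L fuel s c = loopB L fuel' s c := by
  induction fuel generalizing fuel' s c with
  | zero =>
    cases s with
    | nil => cases fuel' <;> simp [loopB]
    | cons a t => simp at h
  | succ n ih =>
    cases s with
    | nil => cases fuel' <;> simp [loopB]
    | cons i t =>
      cases fuel' with
      | zero => simp at h'
      | succ m =>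
        unfold loopB
        split_ifs with h0 hz hc
        · exact ih _ _ _ (by simp at h ⊢; omega) (by simp at h' ⊢; omega)
        · rfl
        · exact ih _ _ _ (by simp at h ⊢; omega) (by simp at h' ⊢; omega)
        · have h0' : ¬ i < 0 ∧ ¬ (L.length : Int) ≤ i := by
            constructor <;> intro hx <;> exact h0 (by first | exact Or.inl hx | exact Or.inr hx)
          have hdec := pvUnvisited_add L c i h0'.1 h0'.2 (fun hm => hc ((PySem.Set.contains_iff _ _).mpr hm))
          exact ih _ _ _ (by simp at h ⊢; omega) (by simp at h' ⊢; omega)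

theorem sim (L : List Int) (fa : Nat) (i : Int) (s : List Int) (c : PySem.Set Int)
    (hfa : pvUnvisited L c + 1 ≤ fa) :
    loopB L (s.length + 1 + 2 * pvUnvisited L c) (i :: s) c
      = (if (goA L fa i c).1 then true
         else loopB L (s.length + 2 * pvUnvisited L (goA L fa i c).2) s (goA L fa i c).2) := by
  induction fa generalizing i s c with
  | zero => omega
  | succ n ih =>
    have hfuel : s.length + 1 + 2 * pvUnvisited L c = (s.length + 2 * pvUnvisited L c) + 1 := by omega
    rw [hfuel]
    rw [show loopB L ((s.length + 2 * pvUnvisited L c) + 1) (i :: s) c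
        = (if i < 0 ∨ (L.length : Int) ≤ i then loopB L (s.length + 2 * pvUnvisited L c) s c
           else if PySem.List.pyGetD L i 0 = 0 then true
           else if PySem.Set.contains c i then loopB L (s.length + 2 * pvUnvisited L c) s c
           else loopB L (s.length + 2 * pvUnvisited L c) ((i - PySem.List.pyGetD L i 0) :: (i + PySem.List.pyGetD L i 0) :: s) (PySem.Set.add c i)) from rfl]
    unfold goA
    by_cases h0 : i < 0
    · simp [h0]
    · by_cases h1 : (L.length : Int) ≤ i
      · simp [h0, h1]
      · by_cases hz : PySem.List.pyGetD L i 0 = 0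
        · simp [h0, h1, hz]
        · by_cases hcn : PySem.Set.contains c i = true
          · have hmem : i ∈ c := (PySem.Set.contains_iff _ _).mp hcn
            simp [h0, h1, hz, hmem]
          · have hni : i ∉ c := fun hm => hcn ((PySem.Set.contains_iff _ _).mpr hm)
            have hor : ¬ (i < 0 ∨ (L.length : Int) ≤ i) := not_or.mpr ⟨h0, h1⟩
            have hdec := pvUnvisited_add L c i h0 h1 (fun hm => hcn ((PySem.Set.contains_iff _ _).mpr hm))
            have hn : pvUnvisited L (PySem.Set.add c i) + 1 ≤ n := by omega
            have hlen : s.length + 2 * pvUnvisited L c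
                = ((i + PySem.List.pyGetD L i 0) :: s).length + 1 + 2 * pvUnvisited L (PySem.Set.add c i) := by
              simp; omega
            rw [if_neg hor, if_neg hz, if_neg hcn, hlen,
              ih (i - PySem.List.pyGetD L i 0) ((i + PySem.List.pyGetD L i 0) :: s) (PySem.Set.add c i) hn]
            cases hgl : goA L n (i - PySem.List.pyGetD L i 0) (PySem.Set.add c i) with
            | mk bl c1 =>
              have hsub : ∀ x, x ∈ PySem.Set.add c i → x ∈ c1 := by
                intro x hx
                have := subset_goA L n (i - PySem.List.pyGetD L i 0) (PySem.Set.add c i) x hx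
                rwa [hgl] at this
              have hmono := pvUnvisited_mono L (PySem.Set.add c i) c1 hsub
              cases bl
              · simp only [if_neg h0, if_neg h1, if_neg hz, if_neg hcn, Bool.false_eq_true, if_false]
                have hfix : ((i + PySem.List.pyGetD L i 0) :: s).length + 2 * pvUnvisited L c1
                    = s.length + 1 + 2 * pvUnvisited L c1 := by simp
                rw [hfix]
                exact ih (i + PySem.List.pyGetD L i 0) s c1 (by omega)
              · simp [h0, h1, hz, hni]

theorem loopB_nil (L : List Int) (f : Nat) (c : PySem.Set Int) : loopB L f [] c = false := by
  cases f <;> simp [loopB]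

-- ===== VERDICT (by name: the statement is the Claim_ definition above) =====
theorem is_goal_reachable_helper_spec : Claim_equal_is_goal_reachable_helper := by
  intro L i c _
  unfold Spec_is_goal_reachable_helper is_goal_reachable_helper is_goal_reachable_helper_alt
  have hle := pvUnvisited_le L (PySem.Set.ofList c)
  have h1 : loopB L (2 * L.length + 1) [i] (PySem.Set.ofList c)
      = loopB L (([] : List Int).length + 1 + 2 * pvUnvisited L (PySem.Set.ofList c)) [i] (PySem.Set.ofList c) := by
    apply loopB_stable <;> simp <;> omega
  rw [h1, sim L (L.length + 1) i [] (PySem.Set.ofList c) (by omega)]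
  by_cases hl : (goA L (L.length + 1) i (PySem.Set.ofList c)).1
  · simp [hl]
  · simp [hl, loopB_nil]
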